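-- pv_equiv track=rewrite | github.com/Ahmed-Abdou14/Cp | codeforces/test.py | bfs
-- ===== SOURCE A (Python) =====
-- def bfs(arr, i):
--     if i >= len(arr): return 0
--     elif arr[i] < 0: return -1111
--     else:
--         return arr[i] + max([
--             bfs(arr, i+1),
--             bfs(arr, i+3),
--             bfs(arr, i+5)])
-- ===== SOURCE B (Python) =====
-- def bfs(arr, i):
--     n = len(arr)
--     memo = {}
--
--     def go(j):
--         if j >= n:
--             return 0
--         if j in memo:
--             return memo[j]
--         v = arr[j]
--         r = -1111 if v < 0 else v + max(go(j + 1), go(j + 3), go(j + 5))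
--         memo[j] = r
--         return r
--
--     return go(i)
-- ===== Notes on version B (the rewrite author's own statement) =====
-- stated objective: alternative
-- what changed: replaces the naive triple-branch recursion by top-down recursion with a memo dictionary, so each index is computed at most once; Pre_ only excludes i < -len(arr), where A raises IndexError
import Mathlib
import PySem

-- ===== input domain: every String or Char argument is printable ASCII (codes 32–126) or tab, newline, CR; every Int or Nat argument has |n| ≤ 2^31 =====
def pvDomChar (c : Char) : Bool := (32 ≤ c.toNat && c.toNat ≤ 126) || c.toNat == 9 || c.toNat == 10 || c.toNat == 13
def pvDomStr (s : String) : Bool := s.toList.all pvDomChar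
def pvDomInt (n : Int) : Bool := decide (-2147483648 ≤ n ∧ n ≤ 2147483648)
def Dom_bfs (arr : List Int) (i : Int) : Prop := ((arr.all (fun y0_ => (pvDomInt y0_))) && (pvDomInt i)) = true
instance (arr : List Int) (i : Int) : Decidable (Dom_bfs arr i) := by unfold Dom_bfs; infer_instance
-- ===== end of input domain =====

-- B replaces A's naive triple-branch recursion by the same recursion with a memo
-- dictionary, so each index is computed at most once (objective: alternative).

-- ===== PORT A =====
-- Literal port of A's recursion; pyGet? arr i is Python's arr[i] (negative wraparound);
-- the `none` case is Python's IndexError (i < -len(arr)), excluded by Pre_bfs.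
-- fuel is only a termination guard: bfs passes enough that the 0-case is never the answer.
def bfsFuel (arr : List Int) (fuel : Nat) (i : Int) : Int :=
  match fuel with
  | 0 => 0
  | fuel + 1 =>
    if i ≥ (arr.length : Int) then 0
    else
      match PySem.List.pyGet? arr i with
      | none => 0
      | some v =>
        if v < 0 then -1111
        else v + max (max (bfsFuel arr fuel (i+1)) (bfsFuel arr fuel (i+3))) (bfsFuel arr fuel (i+5))

def bfs (arr : List Int) (i : Int) : Int :=
  bfsFuel arr ((arr.length : Int) - i).toNat i

-- ===== PORT B =====
-- inner function go of Source B, threading the memo dict through the calls; fuel is only a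
-- termination guard (bfs_alt passes enough fuel that the 0-case is never the answer);
-- the pyGet? `none` case is Python's IndexError, excluded by Pre_bfs
def bfsGo (arr : List Int) (fuel : Nat) (memo : PySem.Dict Int Int) (j : Int) :
    Int × PySem.Dict Int Int :=
  match fuel with
  | 0 => (0, memo)
  | fuel + 1 =>
    if j ≥ (arr.length : Int) then (0, memo)
    else if memo.contains j then ((memo.get? j).getD 0, memo)
    else
      match PySem.List.pyGet? arr j with
      | none => (0, memo)
      | some v =>
        if v < 0 then
          (-1111, memo.insert j (-1111))
        else
          let p1 := bfsGo arr fuel memo (j+1)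
          let p2 := bfsGo arr fuel p1.2 (j+3)
          let p3 := bfsGo arr fuel p2.2 (j+5)
          let r := v + max (max p1.1 p2.1) p3.1
          (r, p3.2.insert j r)

def bfs_alt (arr : List Int) (i : Int) : Int :=
  (bfsGo arr ((arr.length : Int) - i).toNat PySem.Dict.empty i).1

-- ===== PRECONDITION & SPEC =====
-- Pre_ excludes exactly the inputs where Python A raises IndexError: i < -len(arr).
def Pre_bfs (arr : List Int) (i : Int) : Prop := -(arr.length : Int) ≤ i
instance (arr : List Int) (i : Int) : Decidable (Pre_bfs arr i) := by unfold Pre_bfs; infer_instance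
def pvWitness_bfs : List Int × Int := ([3, -1, 4, 2], 0)

def Spec_bfs (arr : List Int) (i : Int) (out : Int) : Prop := out = bfs_alt arr i
instance (arr : List Int) (i : Int) (out : Int) : Decidable (Spec_bfs arr i out) := by unfold Spec_bfs; infer_instance

-- ===== CLAIM =====
def Claim_equal_bfs : Prop := ∀ (arr : List Int) (i : Int), Dom_bfs arr i → Pre_bfs arr i → Spec_bfs arr i (bfs arr i)

-- ===== LEMMAS AND PROOFS =====

theorem bfs_of_ge (arr : List Int) (k : Int) (h : (arr.length : Int) ≤ k) : bfs arr k = 0 := by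
  rw [bfs, show ((arr.length : Int) - k).toNat = 0 from by omega, bfsFuel]

-- the fuel argument is irrelevant once it covers the remaining indices
theorem bfsFuel_congr (arr : List Int) :
    ∀ (f g : Nat) (i : Int), ((arr.length : Int) - i).toNat ≤ f →
      ((arr.length : Int) - i).toNat ≤ g → bfsFuel arr f i = bfsFuel arr g i := by
  intro f
  induction f with
  | zero =>
    intro g i hf hg
    cases g with
    | zero => rfl
    | succ g =>
      have hge : i ≥ (arr.length : Int) := by omega
      rw [bfsFuel, bfsFuel]
      simp [hge]
  | succ f ih =>
    intro g i hf hg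
    cases g with
    | zero =>
      have hge : i ≥ (arr.length : Int) := by omega
      rw [bfsFuel, bfsFuel]
      simp [hge]
    | succ g =>
      rw [bfsFuel, bfsFuel]
      by_cases hge : i ≥ (arr.length : Int)
      · simp [hge]
      · simp only [hge, if_false]
        cases PySem.List.pyGet? arr i with
        | none => rfl
        | some v =>
          dsimp only
          by_cases hv : v < 0
          · simp [hv]
          · simp only [hv, if_false]
            rw [ih g (i+1) (by omega) (by omega), ih g (i+3) (by omega) (by omega),
                ih g (i+5) (by omega) (by omega)]

-- one-step unfolding of bfs below the end of the list
theorem bfs_unfold (arr : List Int) (j : Int) (hlt : ¬ j ≥ (arr.length : Int)) :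
    bfs arr j = match PySem.List.pyGet? arr j with
      | none => 0
      | some v =>
        if v < 0 then -1111
        else v + max (max (bfs arr (j+1)) (bfs arr (j+3))) (bfs arr (j+5)) := by
  rw [bfs, show ((arr.length : Int) - j).toNat = ((arr.length : Int) - (j+1)).toNat + 1 from by omega,
      bfsFuel]
  simp only [hlt, if_false]
  cases PySem.List.pyGet? arr j with
  | none => rfl
  | some v =>
    dsimp only
    by_cases hv : v < 0
    · simp [hv]
    · simp only [hv, if_false]
      rw [bfs, bfs, bfs,
          bfsFuel_congr arr (((arr.length : Int) - (j+1)).toNat) (((arr.length : Int) - (j+3)).toNat) (j+3) (by omega) (by omega),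
          bfsFuel_congr arr (((arr.length : Int) - (j+1)).toNat) (((arr.length : Int) - (j+5)).toNat) (j+5) (by omega) (by omega)]

-- a memo is OK when every stored value is the recursion's value at its key
def MemoOK (arr : List Int) (memo : PySem.Dict Int Int) : Prop :=
  ∀ k r, memo.get? k = some r → r = bfs arr k

theorem bfsGo_correct (arr : List Int) :
    ∀ (fuel : Nat) (j : Int) (memo : PySem.Dict Int Int),
      ((arr.length : Int) - j).toNat ≤ fuel → -(arr.length : Int) ≤ j → MemoOK arr memo →
      (bfsGo arr fuel memo j).1 = bfs arr j ∧ MemoOK arr (bfsGo arr fuel memo j).2 := by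
  intro fuel
  induction fuel with
  | zero =>
    intro j memo ht hj hm
    have hge : j ≥ (arr.length : Int) := by omega
    rw [bfsGo]
    exact ⟨(bfs_of_ge arr j hge).symm, hm⟩
  | succ t ih =>
    intro j memo ht hj hm
    rw [bfsGo]
    by_cases hge : j ≥ (arr.length : Int)
    · simp only [hge, if_true]
      exact ⟨(bfs_of_ge arr j hge).symm, hm⟩
    · simp only [hge, if_false]
      by_cases hc : memo.contains j
      · simp only [hc]
        obtain ⟨r, hr⟩ : ∃ r, memo.get? j = some r := by
          have := PySem.Dict.contains_eq_isSome_get? (d := memo) (k := j)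
          rw [hc] at this
          cases h : memo.get? j with
          | none => rw [h] at this; simp at this
          | some r => exact ⟨r, rfl⟩
        rw [hr]
        exact ⟨by simpa using hm j r hr, hm⟩
      · simp only [hc]
        obtain ⟨v, hv⟩ : ∃ v, PySem.List.pyGet? arr j = some v := by
          cases h : PySem.List.pyGet? arr j with
          | none =>
            exfalso
            have := (PySem.List.pyGet?_eq_none_iff arr j).mp h
            exact this (by simp [PySem.Raise.InRange]; omega)
          | some v => exact ⟨v, rfl⟩
        rw [hv]
        have hbfs : bfs arr j = if v < 0 then -1111
            else v + max (max (bfs arr (j+1)) (bfs arr (j+3))) (bfs arr (j+5)) := by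
          rw [bfs_unfold arr j hge, hv]
        by_cases hv0 : v < 0
        · simp only [hv0, if_true]
          refine ⟨by rw [hbfs]; simp [hv0], ?_⟩
          intro k r hk
          simp only [Bool.false_eq_true, if_false] at hk
          rw [PySem.Dict.get?_insert] at hk
          split at hk
          · rename_i hkj; cases hk; rw [hkj, hbfs]; simp [hv0]
          · exact hm k r hk
        · simp only [hv0, if_false]
          have h1 := ih (j+1) memo (by omega) (by omega) hm
          have h2 := ih (j+3) (bfsGo arr t memo (j+1)).2 (by omega) (by omega) h1.2
          have h3 := ih (j+5) (bfsGo arr t (bfsGo arr t memo (j+1)).2 (j+3)).2 (by omega) (by omega) h2.2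
          refine ⟨by rw [hbfs, h1.1, h2.1, h3.1]; simp [hv0], ?_⟩
          intro k r hk
          simp only [Bool.false_eq_true, if_false] at hk
          rw [PySem.Dict.get?_insert] at hk
          split at hk
          · rename_i hkj; cases hk
            rw [hkj, hbfs, h1.1, h2.1, h3.1]; simp [hv0]
          · exact h3.2 k r hk

-- ===== VERDICT =====
theorem bfs_spec : Claim_equal_bfs := by
  intro arr i _ hPre
  unfold Spec_bfs bfs_alt
  have h := bfsGo_correct arr ((arr.length : Int) - i).toNat i PySem.Dict.empty
    (le_refl _) hPre (by intro k r hk; simp [PySem.Dict.get?_empty] at hk)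
  exact h.1.symm
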